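-- pv_equiv track=rewrite | github.com/hardik-rajpal/NLP-HMM | tagger.py | separateWordsTags
-- ===== SOURCE A (Python) =====
-- def separateWordsTags(mapped_sents):
--     words:list[list[str]] = []
--     tags:list[list[str]] = []
--     for sent in mapped_sents:
--         words.append([]);tags.append([])
--         for (word,tag) in sent:
--             words[-1].append(word)
--             tags[-1].append(tag)
--     return words,tags
-- ===== SOURCE B (Python) =====
-- def separateWordsTags(mapped_sents):
--     def column(sents, i):
--         if not sents:
--             return []
--         return [[pair[i] for pair in sents[0]]] + column(sents[1:], i)
--     return column(mapped_sents, 0), column(mapped_sents, 1)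
-- ===== Notes on version B (the rewrite author's own statement) =====
-- stated objective: alternative
-- what changed: Instead of A's single iterative pass with two parallel mutable accumulators and an inner element-appending loop, B makes two independent staged passes over the input, each a structural recursion extracting one column (words, then tags).
import Mathlib
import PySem

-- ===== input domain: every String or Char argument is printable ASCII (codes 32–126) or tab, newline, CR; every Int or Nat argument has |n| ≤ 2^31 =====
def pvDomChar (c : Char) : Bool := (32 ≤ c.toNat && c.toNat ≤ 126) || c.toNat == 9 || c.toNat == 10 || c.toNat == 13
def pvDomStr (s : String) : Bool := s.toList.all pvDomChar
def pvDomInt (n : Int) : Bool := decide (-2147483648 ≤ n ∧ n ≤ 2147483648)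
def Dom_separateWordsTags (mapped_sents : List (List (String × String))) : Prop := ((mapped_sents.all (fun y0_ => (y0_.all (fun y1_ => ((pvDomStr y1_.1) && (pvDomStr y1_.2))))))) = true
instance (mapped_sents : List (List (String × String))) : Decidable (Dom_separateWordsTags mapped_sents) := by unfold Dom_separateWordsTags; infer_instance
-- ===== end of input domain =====

-- B replaces A's single iterative pass with two parallel mutable accumulators by two
-- independent staged recursive passes, each extracting one column; same result.

-- ===== PORT A =====
-- words[-1].append(word): replace the last sublist of the accumulator
def pvAppendLast (ls : List (List String)) (x : String) : List (List String) :=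
  ls.dropLast ++ [ls.getLastD [] ++ [x]]

def separateWordsTags (mapped_sents : List (List (String × String))) : List (List String) × List (List String) :=
  mapped_sents.foldl
    (fun st sent =>
      sent.foldl
        (fun (st' : List (List String) × List (List String)) wt =>
          (pvAppendLast st'.1 wt.1, pvAppendLast st'.2 wt.2))
        (st.1 ++ [[]], st.2 ++ [[]]))
    ([], [])

-- ===== PORT B =====
-- column(sents, i): structural recursion; pair[i] is p.1 for i = 0, p.2 for i = 1
def pvColumn (sents : List (List (String × String))) (i : Nat) : List (List String) :=
  match sents with
  | [] => []
  | s :: rest => (s.map (fun p => if i = 0 then p.1 else p.2)) :: pvColumn rest i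

def separateWordsTags_alt (mapped_sents : List (List (String × String))) : List (List String) × List (List String) :=
  (pvColumn mapped_sents 0, pvColumn mapped_sents 1)

-- ===== PRECONDITION & SPEC =====
def Spec_separateWordsTags (mapped_sents : List (List (String × String))) (out : List (List String) × List (List String)) : Prop := out = separateWordsTags_alt mapped_sents
instance (mapped_sents : List (List (String × String))) (out : List (List String) × List (List String)) : Decidable (Spec_separateWordsTags mapped_sents out) := by unfold Spec_separateWordsTags; infer_instance

-- ===== CLAIM (what is proved, stated in full; the proofs are below) =====
def Claim_equal_separateWordsTags : Prop := ∀ (mapped_sents : List (List (String × String))), Dom_separateWordsTags mapped_sents → Spec_separateWordsTags mapped_sents (separateWordsTags mapped_sents)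

-- ===== LEMMAS AND PROOFS =====

-- A's inner loop over one sentence appends the sentence's two columns to the last sublists
theorem inner_loop_eq (sent : List (String × String)) (aw at_ : List (List String))
    (cw ct : List String) :
    sent.foldl
      (fun (st' : List (List String) × List (List String)) wt =>
        (pvAppendLast st'.1 wt.1, pvAppendLast st'.2 wt.2))
      (aw ++ [cw], at_ ++ [ct])
    = (aw ++ [cw ++ sent.map Prod.fst], at_ ++ [ct ++ sent.map Prod.snd]) := by
  induction sent generalizing cw ct with
  | nil => simp
  | cons wt rest ih =>
      rw [List.foldl_cons]
      show List.foldl _ (pvAppendLast (aw ++ [cw]) wt.1, pvAppendLast (at_ ++ [ct]) wt.2) rest = _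
      have h1 : pvAppendLast (aw ++ [cw]) wt.1 = aw ++ [cw ++ [wt.1]] := by
        simp [pvAppendLast]
      have h2 : pvAppendLast (at_ ++ [ct]) wt.2 = at_ ++ [ct ++ [wt.2]] := by
        simp [pvAppendLast]
      rw [h1, h2, ih]
      simp

-- A's outer loop, from accumulators (aw, at_), appends the column lists of the sentences
theorem outer_loop_eq (ms : List (List (String × String))) (aw at_ : List (List String)) :
    ms.foldl
      (fun st sent =>
        sent.foldl
          (fun (st' : List (List String) × List (List String)) wt =>
            (pvAppendLast st'.1 wt.1, pvAppendLast st'.2 wt.2))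
          (st.1 ++ [[]], st.2 ++ [[]]))
      (aw, at_)
    = (aw ++ ms.map (fun s => s.map Prod.fst), at_ ++ ms.map (fun s => s.map Prod.snd)) := by
  induction ms generalizing aw at_ with
  | nil => simp
  | cons sent rest ih =>
      rw [List.foldl_cons]
      show List.foldl _ (List.foldl _ (aw ++ [[]], at_ ++ [[]]) sent) rest = _
      rw [inner_loop_eq sent aw at_ [] []]
      simp only [List.nil_append]
      rw [ih]
      simp

-- B's column function computes the corresponding map
theorem pvColumn_fst (ms : List (List (String × String))) :
    pvColumn ms 0 = ms.map (fun s => s.map Prod.fst) := by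
  induction ms with
  | nil => rfl
  | cons s rest ih => simp [pvColumn, ih]

theorem pvColumn_snd (ms : List (List (String × String))) :
    pvColumn ms 1 = ms.map (fun s => s.map Prod.snd) := by
  induction ms with
  | nil => rfl
  | cons s rest ih => simp [pvColumn, ih]

-- ===== VERDICT (by name: the statement is the Claim_ definition above) =====
theorem separateWordsTags_spec : Claim_equal_separateWordsTags := by
  intro ms _
  unfold Spec_separateWordsTags separateWordsTags separateWordsTags_alt
  rw [outer_loop_eq, pvColumn_fst, pvColumn_snd]
  simp
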